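-- pv_equiv track=rewrite | github.com/Club-ALTech/crc2026-prelim | Prelim2/part1/part_1.py | get_next_targeted_ladder
-- ===== SOURCE A (Python) =====
-- def get_longest_ladder(ladders: list[tuple[int, int]]):
--     return max(ladders, key=lambda ladder: ladder[1] - ladder[0])
--
-- def get_next_targeted_ladder(position: int, ladders: list[tuple[int, int]]):
--     # All the useful ladders that will help us reach the longest one (included), aka shortest way
--     targets: list[tuple[int, int]] = []
--
--     if not ladders:
--         return None
--
--     longest_ladder = get_longest_ladder(ladders)
--
--     if not longest_ladder:
--         return None
--
--     # If we already used or passed the longest ladder, then if there is still ladders remaining, use them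
--     if position >= longest_ladder[1]:
--         if ladders[ladders.index(longest_ladder) + 1:]:
--             return get_next_targeted_ladder(position, ladders[ladders.index(longest_ladder) + 1:])
--         return None
--
--     # Find the ladders that will help us reach the longest one, or finish the game (pos 100)
--     for ladder in ladders:
--         """
--             If we still haven't passed the ladder AND :
--                 - It's before the longest one BUT : its end is before the longest one's start
--                     (   It's supposed to be helping us reach the longest one, faster    )
--                 OR
--                 - It's the longest one itself
--                 OR
--                 - It comes after the longest one : will help us end the game faster
--         """
--         if position < ladder[0] and (ladder[1] <= longest_ladder[0] or ladder == longest_ladder or longest_ladder[1] < ladder[0]):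
--             targets.append(ladder)
--
--     if targets:
--         return targets[0]
--
--     return None
-- ===== SOURCE B (Python) =====
-- def get_next_targeted_ladder(position: int, ladders: list[tuple[int, int]]):
--     # One right-to-left pass collects the "stage" ladders: indices i whose ladder is at
--     # least as long as every ladder after it (first occurrence of each suffix maximum).
--     chain = []
--     best_len = None
--     for i, lad in reversed(list(enumerate(ladders))):
--         length = lad[1] - lad[0]
--         if best_len is None or best_len <= length:
--             chain.append((i, lad))
--             best_len = length
--     # Walk the stages left-to-right: the first stage whose longest ladder we have not
--     # passed is the active one; scan its segment once for the first helpful ladder.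
--     seg_start = 0
--     for j, longest in reversed(chain):
--         if position < longest[1]:
--             for lad in ladders[seg_start:]:
--                 if position < lad[0] and (lad[1] <= longest[0] or lad == longest or longest[1] < lad[0]):
--                     return lad
--             return None
--         seg_start = j + 1
--     return None
-- ===== Notes on version B (the rewrite author's own statement) =====
-- stated objective: faster
-- what changed: Replaces A's repeated max/index/slice recursion over shrinking suffixes by one right-to-left pass that collects the chain of suffix-maximum ladders, then a single walk over that chain and one final scan.
import Mathlib
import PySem

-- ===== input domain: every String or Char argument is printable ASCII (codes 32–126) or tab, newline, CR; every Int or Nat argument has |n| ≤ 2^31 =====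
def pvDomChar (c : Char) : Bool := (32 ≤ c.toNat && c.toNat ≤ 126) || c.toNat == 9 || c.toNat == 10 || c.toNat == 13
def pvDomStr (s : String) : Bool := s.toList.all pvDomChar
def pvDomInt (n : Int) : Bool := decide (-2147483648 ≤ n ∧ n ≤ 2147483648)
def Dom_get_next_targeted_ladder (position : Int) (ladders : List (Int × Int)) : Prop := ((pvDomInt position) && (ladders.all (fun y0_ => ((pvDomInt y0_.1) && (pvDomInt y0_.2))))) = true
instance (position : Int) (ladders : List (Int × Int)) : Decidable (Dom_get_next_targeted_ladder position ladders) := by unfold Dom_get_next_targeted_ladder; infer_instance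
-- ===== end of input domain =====

-- B replaces A's repeated max/index/slice recursion by one right-to-left pass collecting the
-- chain of suffix-maximum ladders, then a single left-to-right walk and one final scan.

-- ===== PORT A =====
-- port of get_longest_ladder: max(ladders, key=lambda l: l[1]-l[0])
def pvLongest (ladders : List (Int × Int)) : Option (Int × Int) :=
  PySem.List.max? ladders (fun l => l.2 - l.1)

def get_next_targeted_ladder (position : Int) (ladders : List (Int × Int)) : Option (Int × Int) :=
  if ladders = [] then none
  else
    match pvLongest ladders with
    | none => none
    | some longest =>
      -- Python's `if not longest_ladder:` is always false for a 2-tuple; nothing to port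
      if longest.2 ≤ position then   -- position >= longest_ladder[1]
        match h : PySem.List.index? ladders longest with
        | none => none               -- unreachable: longest ∈ ladders
        | some i =>
          let rest := PySem.List.slice ladders (some ((i : Int) + 1)) none
          if rest ≠ [] then get_next_targeted_ladder position rest else none
      else
        let targets := ladders.foldl (fun acc l =>
          if position < l.1 ∧ (l.2 ≤ longest.1 ∨ l = longest ∨ longest.2 < l.1)
          then acc ++ [l] else acc) []
        match targets with
        | [] => none
        | t :: _ => some t
termination_by ladders.length
decreasing_by
  have ⟨hk, _, _⟩ := PySem.List.getElem_of_index?_eq_some h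
  have hs : PySem.List.slice ladders (some ((i : Int) + 1)) none = ladders.drop (i + 1) := by
    have h1 : ((i : Int) + 1) = ((i + 1 : Nat) : Int) := by push_cast; ring
    rw [h1, PySem.List.slice_from _ (by positivity), Int.toNat_natCast]
  simp [hs]
  omega

-- ===== PORT B =====
-- state of the first loop: (chain, best_len); best_len = none is Python's `best_len is None`
def pvAltStep (st : List (Int × (Int × Int)) × Option Int) (p : Int × (Int × Int)) :
    List (Int × (Int × Int)) × Option Int :=
  let length := p.2.2 - p.2.1
  match st.2 with
  | none => (st.1 ++ [p], some length)
  | some b => if b ≤ length then (st.1 ++ [p], some length) else st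

-- for i, lad in reversed(list(enumerate(ladders))): …
def pvAltChain (ladders : List (Int × Int)) : List (Int × (Int × Int)) :=
  ((PySem.List.enumerate ladders).reverse.foldl pvAltStep ([], none)).1

-- the second loop (early return), walking reversed(chain) and tracking seg_start
def pvAltScan (position : Int) (ladders : List (Int × Int)) (segStart : Int) :
    List (Int × (Int × Int)) → Option (Int × Int)
  | [] => none
  | (j, longest) :: rest =>
    if position < longest.2 then
      (PySem.List.slice ladders (some segStart) none).find? (fun lad =>
        decide (position < lad.1 ∧ (lad.2 ≤ longest.1 ∨ lad = longest ∨ longest.2 < lad.1)))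
    else pvAltScan position ladders (j + 1) rest

def get_next_targeted_ladder_alt (position : Int) (ladders : List (Int × Int)) : Option (Int × Int) :=
  pvAltScan position ladders 0 (pvAltChain ladders).reverse

-- ===== PRECONDITION & SPEC =====
def Spec_get_next_targeted_ladder (position : Int) (ladders : List (Int × Int)) (out : Option (Int × Int)) : Prop := out = get_next_targeted_ladder_alt position ladders
instance (position : Int) (ladders : List (Int × Int)) (out : Option (Int × Int)) : Decidable (Spec_get_next_targeted_ladder position ladders out) := by unfold Spec_get_next_targeted_ladder; infer_instance

-- ===== CLAIM (what is proved, stated in full; the proofs are below) =====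
def Claim_equal_get_next_targeted_ladder : Prop := ∀ (position : Int) (ladders : List (Int × Int)), Dom_get_next_targeted_ladder position ladders → Spec_get_next_targeted_ladder position ladders (get_next_targeted_ladder position ladders)

-- ===== LEMMAS AND PROOFS =====

-- the running-max loop inside max?: first-extremal decomposition of the list
theorem pv_max_decomp (key : (Int × Int) → Int) :
    ∀ (t : List (Int × Int)) (c : Int × Int), ∃ pre suf m,
      PySem.List.max? (c :: t) key = some m ∧
      c :: t = pre ++ m :: suf ∧ (∀ x ∈ pre, key x < key m) ∧ (∀ x ∈ suf, key x ≤ key m) := by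
  intro t
  induction t with
  | nil =>
    intro c
    exact ⟨[], [], c, by simp [PySem.List.max?], rfl, by simp, by simp⟩
  | cons y t' ih =>
    intro c
    by_cases hcy : key c < key y
    · obtain ⟨pre', suf', m, hfold, hdec, hpre, hsuf⟩ := ih y
      have hstep : PySem.List.max? (c :: y :: t') key = PySem.List.max? (y :: t') key := by
        simp [PySem.List.max?, hcy]
      refine ⟨c :: pre', suf', m, hstep ▸ hfold, by simp [hdec], ?_, hsuf⟩
      intro x hx
      rcases List.mem_cons.1 hx with rfl | hx'
      · cases pre' with
        | nil =>
          simp only [List.nil_append, List.cons.injEq] at hdec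
          exact hdec.1 ▸ hcy
        | cons a pre'' =>
          simp only [List.cons_append, List.cons.injEq] at hdec
          exact lt_trans hcy (hdec.1 ▸ hpre a (by simp))
      · exact hpre x hx'
    · obtain ⟨pre', suf', m, hfold, hdec, hpre, hsuf⟩ := ih c
      have hstep : PySem.List.max? (c :: y :: t') key = PySem.List.max? (c :: t') key := by
        simp [PySem.List.max?, hcy]
      cases pre' with
      | nil =>
        simp only [List.nil_append, List.cons.injEq] at hdec
        refine ⟨[], y :: t', m, hstep ▸ hfold, by simp [hdec.1], by simp, ?_⟩
        intro x hx
        rcases List.mem_cons.1 hx with rfl | hx'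
        · exact hdec.1 ▸ (not_lt.1 hcy)
        · rw [hdec.2] at hx'
          exact hsuf x hx'
      | cons a pre'' =>
        simp only [List.cons_append, List.cons.injEq] at hdec
        refine ⟨c :: y :: pre'', suf', m, hstep ▸ hfold, by simp [hdec.2], ?_, hsuf⟩
        have hcm : key c < key m := hdec.1 ▸ hpre a (by simp)
        intro x hx
        rcases List.mem_cons.1 hx with rfl | hx'
        · exact hcm
        rcases List.mem_cons.1 hx' with rfl | hx''
        · exact lt_of_le_of_lt (not_lt.1 hcy) hcm
        · exact hpre x (by simp [hx''])

-- abbreviation (proof-side): the first loop as a foldr over the enumerated list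
def pvCore (es : List (Int × (Int × Int))) : List (Int × (Int × Int)) × Option Int :=
  es.foldr (fun p st => pvAltStep st p) ([], none)

theorem pv_altChain_core (ladders : List (Int × Int)) :
    pvAltChain ladders = (pvCore (PySem.List.enumerate ladders)).1 := by
  unfold pvAltChain pvCore
  rw [List.foldl_reverse]

theorem pv_core_cons (p : Int × (Int × Int)) (es : List (Int × (Int × Int))) :
    pvCore (p :: es) = pvAltStep (pvCore es) p := rfl

theorem pv_core_best (es : List (Int × (Int × Int))) :
    (pvCore es).2 = none ∨ ∃ p ∈ es, (pvCore es).2 = some (p.2.2 - p.2.1) := by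
  induction es with
  | nil => left; rfl
  | cons p es ih =>
    rw [pv_core_cons]
    unfold pvAltStep
    rcases h : (pvCore es).2 with _ | b
    · simp only []
      right; exact ⟨p, by simp, rfl⟩
    · simp only []
      by_cases hb : b ≤ p.2.2 - p.2.1
      · rw [if_pos hb]
        right; exact ⟨p, by simp, rfl⟩
      · rw [if_neg hb]
        rcases ih with h0 | ⟨q, hq, hq2⟩
        · rw [h0] at h; cases h
        · right; exact ⟨q, by simp [hq], hq2⟩

theorem pv_core_sub (es : List (Int × (Int × Int))) :
    ∀ q ∈ (pvCore es).1, q ∈ es := by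
  induction es with
  | nil => intro q hq; exact absurd hq (by simp [pvCore])
  | cons p es ih =>
    intro q hq
    rw [pv_core_cons] at hq
    unfold pvAltStep at hq
    rcases h : (pvCore es).2 with _ | b <;> simp only [h] at hq
    · simp at hq
      rcases hq with hq | rfl
      · exact List.mem_cons_of_mem _ (ih q hq)
      · simp
    · by_cases hb : b ≤ p.2.2 - p.2.1 <;> simp [hb] at hq
      · rcases hq with hq | rfl
        · exact List.mem_cons_of_mem _ (ih q hq)
        · simp
      · exact List.mem_cons_of_mem _ (ih q hq)

-- elements strictly shorter than the recorded best are skipped by the loop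
theorem pv_core_skip (b : Int) :
    ∀ (es : List (Int × (Int × Int))) (st : List (Int × (Int × Int)) × Option Int),
      st.2 = some b → (∀ p ∈ es, p.2.2 - p.2.1 < b) →
      es.foldr (fun p st => pvAltStep st p) st = st := by
  intro es
  induction es with
  | nil => intro st _ _; rfl
  | cons p es ih =>
    intro st hst hlt
    have hrest : es.foldr (fun p st => pvAltStep st p) st = st :=
      ih st hst (fun q hq => hlt q (by simp [hq]))
    show pvAltStep (es.foldr (fun p st => pvAltStep st p) st) p = st
    rw [hrest]
    unfold pvAltStep
    simp only [hst]
    have := hlt p (by simp)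
    simp [not_le.2 this]

-- shifting every recorded index shifts the chain and keeps the best length
theorem pv_core_shift (k : Int) (es : List (Int × (Int × Int))) :
    pvCore (es.map (fun p => (p.1 + k, p.2))) =
      ((pvCore es).1.map (fun p => (p.1 + k, p.2)), (pvCore es).2) := by
  induction es with
  | nil => rfl
  | cons p es ih =>
    rw [List.map_cons, pv_core_cons, pv_core_cons, ih]
    unfold pvAltStep
    rcases h : (pvCore es).2 with _ | b
    · simp
    · by_cases hb : b ≤ p.2.2 - p.2.1 <;> simp [hb, h]

theorem pv_enumerate_shift (xs : List (Int × Int)) :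
    ∀ (s t : Int), PySem.List.enumerate xs (s + t) =
      (PySem.List.enumerate xs t).map (fun p => (p.1 + s, p.2)) := by
  induction xs with
  | nil => intro s t; simp [PySem.List.enumerate_nil]
  | cons x xs ih =>
    intro s t
    rw [PySem.List.enumerate_cons, PySem.List.enumerate_cons]
    simp only [List.map_cons]
    rw [show s + t + 1 = s + (t + 1) by ring, ih s (t + 1)]
    rw [add_comm s t]

-- walking a uniformly shifted chain over the full list = walking the chain over the dropped list
theorem pv_scan_shift :
    ∀ (ch : List (Int × (Int × Int))) (position : Int) (ladders : List (Int × Int)) (k : Nat) (s : Int),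
      0 ≤ s → (∀ p ∈ ch, 0 ≤ p.1) →
      pvAltScan position ladders (s + (k : Int)) (ch.map (fun p => (p.1 + (k : Int), p.2))) =
        pvAltScan position (ladders.drop k) s ch := by
  intro ch
  induction ch with
  | nil => intro position ladders k s _ _; rfl
  | cons p rest ih =>
    intro position ladders k s hs hch
    obtain ⟨j, L⟩ := p
    show pvAltScan position ladders (s + k) ((j + k, L) :: rest.map _) = _
    unfold pvAltScan
    by_cases hpos : position < L.2
    · simp only [hpos, if_pos]
      have h1 : PySem.List.slice ladders (some (s + (k : Int))) none = ladders.drop (s + (k : Int)).toNat := by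
        rw [PySem.List.slice_from _ (by omega)]
      have h2 : PySem.List.slice (ladders.drop k) (some s) none = (ladders.drop k).drop s.toNat := by
        rw [PySem.List.slice_from _ hs]
      rw [h1, h2, List.drop_drop]
      have htn : (s + (k : Int)).toNat = k + s.toNat := by omega
      rw [htn]
    · rw [if_neg hpos, if_neg hpos]
      have hj : 0 ≤ j := hch (j, L) (by simp)
      rw [show j + (k : Int) + 1 = (j + 1) + (k : Int) by ring]
      exact ih position ladders k (j + 1) (by omega) (fun q hq => hch q (by simp [hq]))

theorem pv_scan_shift0 (ch : List (Int × (Int × Int))) (position : Int) (ladders : List (Int × Int))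
    (k : Nat) (hch : ∀ p ∈ ch, 0 ≤ p.1) :
    pvAltScan position ladders ((k : Int)) (ch.map (fun p => (p.1 + (k : Int), p.2))) =
      pvAltScan position (ladders.drop k) 0 ch := by
  have h := pv_scan_shift ch position ladders k 0 le_rfl hch
  rw [zero_add] at h
  exact h

-- the chain of pre ++ L :: suf, when L is the first maximum: suffix chain (shifted) then (|pre|, L)
theorem pv_chain_decomp (pre suf : List (Int × Int)) (L : Int × Int)
    (hpre : ∀ x ∈ pre, x.2 - x.1 < L.2 - L.1) (hsuf : ∀ x ∈ suf, x.2 - x.1 ≤ L.2 - L.1) :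
    pvAltChain (pre ++ L :: suf) =
      (pvAltChain suf).map (fun p => (p.1 + ((pre.length : Int) + 1), p.2)) ++ [((pre.length : Int), L)] := by
  rw [pv_altChain_core, pv_altChain_core]
  rw [PySem.List.enumerate_append, PySem.List.enumerate_cons]
  have hshift : PySem.List.enumerate suf ((0 : Int) + pre.length + 1) =
      (PySem.List.enumerate suf 0).map (fun p => (p.1 + ((pre.length : Int) + 1), p.2)) := by
    rw [show (0 : Int) + pre.length + 1 = ((pre.length : Int) + 1) + 0 by ring]
    exact pv_enumerate_shift suf ((pre.length : Int) + 1) 0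
  unfold pvCore
  rw [List.foldr_append]
  -- the L step fires
  set S := pvCore (PySem.List.enumerate suf ((0 : Int) + pre.length + 1)) with hS
  have hSdef : List.foldr (fun p st => pvAltStep st p) ([], none)
      (PySem.List.enumerate suf ((0 : Int) + pre.length + 1)) = S := rfl
  have hSshift : S = ((pvCore (PySem.List.enumerate suf 0)).1.map
      (fun p => (p.1 + ((pre.length : Int) + 1), p.2)), (pvCore (PySem.List.enumerate suf 0)).2) := by
    rw [hS, hshift]
    exact pv_core_shift _ _
  have hstep : pvAltStep S ((0 : Int) + pre.length, L) = (S.1 ++ [((0 : Int) + pre.length, L)], some (L.2 - L.1)) := by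
    unfold pvAltStep
    rcases hb : S.2 with _ | b
    · rfl
    · have hble : b ≤ L.2 - L.1 := by
        rcases pv_core_best (PySem.List.enumerate suf ((0 : Int) + pre.length + 1)) with h0 | ⟨q, hq, hq2⟩
        · rw [← hS] at h0; rw [h0] at hb; cases hb
        · rw [← hS] at hq2; rw [hq2] at hb
          obtain ⟨b2⟩ := hb
          obtain ⟨kk, hkk, rfl⟩ := (PySem.List.mem_enumerate_iff _ _ _).1 hq
          exact hsuf _ (by simp [List.getElem_mem])
      simp [hble]
  show (List.foldr (fun p st => pvAltStep st p)
      (List.foldr (fun p st => pvAltStep st p) ([], none)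
        ((0 + ↑pre.length, L) :: PySem.List.enumerate suf (0 + ↑pre.length + 1)))
      (PySem.List.enumerate pre 0)).1 = _
  rw [List.foldr_cons, hSdef, hstep]
  rw [pv_core_skip (L.2 - L.1) _ _ rfl ?hlt]
  case hlt =>
    intro p hp
    obtain ⟨kk, hkk, rfl⟩ := (PySem.List.mem_enumerate_iff _ _ _).1 hp
    exact hpre _ (by simp [List.getElem_mem])
  rw [hSshift]
  simp [pvCore]

-- main equivalence, by strong induction on the length of the ladder list
theorem equiv_len : ∀ (n : Nat) (ladders : List (Int × Int)), ladders.length = n →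
    ∀ (position : Int),
    get_next_targeted_ladder position ladders = get_next_targeted_ladder_alt position ladders := by
  intro n
  induction n using Nat.strong_induction_on with
  | _ n ih =>
    intro ladders hn position
    cases ladders with
    | nil =>
      rw [get_next_targeted_ladder]
      simp [get_next_targeted_ladder_alt, pvAltChain, PySem.List.enumerate_nil, pvAltScan]
    | cons x t =>
      obtain ⟨pre, suf, L, hmax, hdec, hpre, hsuf⟩ := pv_max_decomp (fun l => l.2 - l.1) t x
      have hidx : PySem.List.index? (x :: t) L = some pre.length := by
        rw [PySem.List.index?_eq_some_iff]
        exact ⟨pre, suf, hdec, rfl, fun hmem => lt_irrefl _ (hpre L hmem)⟩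
      have hchain : (pvAltChain (x :: t)).reverse =
          ((pre.length : Int), L) ::
            ((pvAltChain suf).reverse.map (fun p => (p.1 + ((pre.length : Int) + 1), p.2))) := by
        rw [hdec, pv_chain_decomp pre suf L hpre hsuf]
        simp [List.map_reverse]
      have hdrop : (x :: t).drop (pre.length + 1) = suf := by
        rw [hdec, show pre ++ L :: suf = (pre ++ [L]) ++ suf by simp]
        exact List.drop_left' (by simp)
      rw [get_next_targeted_ladder]
      simp only [if_neg (List.cons_ne_nil x t), pvLongest, hmax]
      by_cases hpos : L.2 ≤ position
      · simp only [if_pos hpos]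
        -- the match on index? reduces via hidx
        rw [get_next_targeted_ladder_alt, hchain]
        have hrest : PySem.List.slice (x :: t) (some ((pre.length : Int) + 1)) none = suf := by
          rw [show ((pre.length : Int) + 1) = ((pre.length + 1 : Nat) : Int) by push_cast; ring,
              PySem.List.slice_from _ (by positivity), Int.toNat_natCast, hdrop]
        have hscan : pvAltScan position (x :: t) 0 (((pre.length : Int), L) ::
            ((pvAltChain suf).reverse.map (fun p => (p.1 + ((pre.length : Int) + 1), p.2)))) =
            get_next_targeted_ladder_alt position suf := by
          show (if position < L.2 then _ else _) = _
          rw [if_neg (by omega)]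
          rw [show (pre.length : Int) + 1 = ((pre.length + 1 : Nat) : Int) by push_cast; ring]
          rw [pv_scan_shift0 _ position (x :: t) (pre.length + 1) ?hnn]
          case hnn =>
            intro p hp
            have hp1 : p ∈ (pvAltChain suf) := List.mem_reverse.1 hp
            rw [pv_altChain_core] at hp1
            have := pv_core_sub _ _ hp1
            obtain ⟨kk, hkk, rfl⟩ := (PySem.List.mem_enumerate_iff _ _ _).1 this
            simp
          rw [hdrop]
          rfl
        rw [hscan]
        split
        next heq => rw [hidx] at heq; cases heq
        next i heq =>
          rw [hidx] at heq
          obtain ⟨rfl⟩ := heq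
          rw [hrest]
          by_cases hsufnil : suf = []
          · subst hsufnil
            simp only [ne_eq, not_true_eq_false, ite_false]
            simp [get_next_targeted_ladder_alt, pvAltChain, PySem.List.enumerate_nil, pvAltScan]
          · rw [if_pos hsufnil]
            exact ih suf.length (by rw [← hn, hdec]; simp; omega) suf rfl position
      · simp only [if_neg hpos]
        rw [PySem.List.foldl_append_ite_eq_filter]
        rw [List.nil_append]
        rw [get_next_targeted_ladder_alt, hchain]
        show _ = (if position < L.2 then _ else _)
        rw [if_pos (by omega)]
        rw [PySem.List.slice_zero_start, PySem.List.slice_none_none]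
        rw [← List.head?_filter]
        rcases hfil : List.filter _ (x :: t) with _ | ⟨a, b⟩ <;> simp

theorem equiv_main : ∀ (position : Int) (ladders : List (Int × Int)),
    get_next_targeted_ladder position ladders = get_next_targeted_ladder_alt position ladders :=
  fun position ladders => equiv_len ladders.length ladders rfl position

-- ===== VERDICT (by name: the statement is the Claim_ definition above) =====
theorem get_next_targeted_ladder_spec : Claim_equal_get_next_targeted_ladder := by
  intro position ladders _
  unfold Spec_get_next_targeted_ladder
  exact equiv_main position ladders
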